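-- pv_equiv track=rewrite | github.com/fschirinzi34/Shield | Dataset/uniq_clean_dataset.py | fix_maiuscole_func
-- ===== SOURCE A (Python) =====
-- def fix_maiuscole_func(text):
--     if not text:
--         return text
--
--     result = []
--     i = 0
--
--     while i < len(text):
--         char = text[i]
--
--         if i == 0:
--             result.append(char)
--             i += 1
--             continue
--
--         if char.isupper() and char.isalpha():
--             prev_non_space_idx = i - 1
--             while prev_non_space_idx >= 0 and text[prev_non_space_idx].isspace():
--                 prev_non_space_idx -= 1
--
--             if prev_non_space_idx >= 0:
--                 prev_char = text[prev_non_space_idx]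
--
--                 if prev_char in '.!?':
--                     result.append(char)
--                 else:
--                     result.append(char.lower())
--             else:
--                 result.append(char)
--         else:
--             result.append(char)
--
--         i += 1
--
--     return ''.join(result)
-- ===== SOURCE B (Python) =====
-- def fix_maiuscole_func(text):
--     out = []
--     last = None  # last non-space character seen so far
--     for idx, ch in enumerate(text):
--         if idx > 0 and ch.isupper() and ch.isalpha() and last is not None and last not in '.!?':
--             out.append(ch.lower())
--         else:
--             out.append(ch)
--         if not ch.isspace():
--             last = ch
--     return ''.join(out)
-- ===== Notes on version B (the rewrite author's own statement) =====
-- stated objective: faster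
-- what changed: Replaced the per-uppercase backward scan over preceding whitespace with a single forward pass that maintains the last non-space character incrementally.
import Mathlib
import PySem

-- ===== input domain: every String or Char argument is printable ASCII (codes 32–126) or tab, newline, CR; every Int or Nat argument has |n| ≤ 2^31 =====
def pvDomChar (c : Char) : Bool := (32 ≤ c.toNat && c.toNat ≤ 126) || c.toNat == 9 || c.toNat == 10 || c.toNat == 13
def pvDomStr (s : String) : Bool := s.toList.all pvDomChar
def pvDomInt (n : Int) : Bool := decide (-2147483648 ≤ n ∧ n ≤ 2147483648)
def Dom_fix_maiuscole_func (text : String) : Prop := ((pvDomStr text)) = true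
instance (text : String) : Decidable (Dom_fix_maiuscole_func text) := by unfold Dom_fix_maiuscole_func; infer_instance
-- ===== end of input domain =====

-- B replaces A's backward whitespace scan at each uppercase letter by one forward pass
-- that tracks the last non-space character; faster (asymptotic in the worst case).

-- ===== PORT A =====
-- A's inner `while prev_non_space_idx >= 0 and text[prev_non_space_idx].isspace()` loop:
-- pvScanBack cs i scans from index i-1 downwards; returns the previous non-space char, none if all spaces.
-- (indices are always in range when called with i ≤ cs.length, so getD's default is never read)
def pvScanBack (cs : List Char) : Nat → Option Char
  | 0 => none
  | j+1 =>
    let c := cs.getD j ' '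
    if PySem.Chars.isspace c then pvScanBack cs j else some c

-- A's outer `while i < len(text)` loop with its result accumulator
def pvLoopA (cs : List Char) (i : Nat) (result : List Char) : List Char :=
  if _h : i < cs.length then
    let char := cs.getD i ' '
    let result' :=
      if i = 0 then result ++ [char]
      else if PySem.Chars.isupper char && PySem.Chars.isalpha char then
        match pvScanBack cs i with
        | some prev =>
          if prev = '.' || prev = '!' || prev = '?' then result ++ [char]
          else result ++ [PySem.Chars.lowerChar char]
        | none => result ++ [char]
      else result ++ [char]
    pvLoopA cs (i+1) result'
  else result
termination_by cs.length - i

def fix_maiuscole_func (text : String) : String :=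
  if text.toList = [] then text
  else String.ofList (pvLoopA text.toList 0 [])

-- ===== PORT B =====
-- Source B's `for idx, ch in enumerate(text)` loop, carrying (idx, last non-space char, out)
def pvLoopB : List Char → Nat → Option Char → List Char → List Char
  | [], _, _, out => out
  | ch :: rest, idx, last, out =>
    let out' :=
      if 0 < idx && PySem.Chars.isupper ch && PySem.Chars.isalpha ch &&
         (match last with
          | some l => !(l = '.' || l = '!' || l = '?')
          | none => false)
      then out ++ [PySem.Chars.lowerChar ch]
      else out ++ [ch]
    pvLoopB rest (idx+1) (if PySem.Chars.isspace ch then last else some ch) out'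

def fix_maiuscole_func_alt (text : String) : String :=
  String.ofList (pvLoopB text.toList 0 none [])

-- ===== PRECONDITION & SPEC =====
def Spec_fix_maiuscole_func (text : String) (out : String) : Prop := out = fix_maiuscole_func_alt text
instance (text : String) (out : String) : Decidable (Spec_fix_maiuscole_func text out) := by unfold Spec_fix_maiuscole_func; infer_instance

-- ===== CLAIM (what is proved, stated in full; the proofs are below) =====
def Claim_equal_fix_maiuscole_func : Prop := ∀ (text : String), Dom_fix_maiuscole_func text → Spec_fix_maiuscole_func text (fix_maiuscole_func text)

-- ===== LEMMAS AND PROOFS =====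

theorem pvLoopB_cons (ch : Char) (rest : List Char) (idx : Nat) (last : Option Char)
    (out : List Char) :
    pvLoopB (ch :: rest) idx last out =
      pvLoopB rest (idx+1) (if PySem.Chars.isspace ch then last else some ch)
        (if 0 < idx && PySem.Chars.isupper ch && PySem.Chars.isalpha ch &&
            (match last with
             | some l => !(l = '.' || l = '!' || l = '?')
             | none => false)
         then out ++ [PySem.Chars.lowerChar ch]
         else out ++ [ch]) := rfl

-- B's incrementally tracked state equals A's backward scan, so the two loops agree
-- from any position k onward given the same accumulator.
theorem pvLoop_eq (cs : List Char) : ∀ (k acc : _),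
    pvLoopA cs k acc = pvLoopB (cs.drop k) k (pvScanBack cs k) acc := by
  intro k
  induction hn : cs.length - k using Nat.strong_induction_on generalizing k with
  | _ n ih =>
    intro acc
    by_cases h : k < cs.length
    · have hdrop : cs.drop k = cs[k] :: cs.drop (k+1) := List.drop_eq_getElem_cons h
      have hget : cs[k]?.getD ' ' = cs[k] := by simp [List.getElem?_eq_getElem h]
      rw [pvLoopA, dif_pos h, hdrop, pvLoopB_cons]
      have hscan : (if PySem.Chars.isspace cs[k] then pvScanBack cs k else some cs[k])
          = pvScanBack cs (k+1) := by
        rw [pvScanBack]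
        simp only [List.getD, hget]
      rw [hscan, ih (cs.length - (k+1)) (by omega) (k+1) rfl]
      congr 1
      -- the two appended accumulators coincide
      rcases Nat.eq_zero_or_pos k with hk | hk
      · subst hk; simp [hget]
      · have hk0 : ¬ k = 0 := by omega
        rcases hsb : pvScanBack cs k with _ | prev
      -- no previous non-space character: both keep the char
        · simp [hget, hk0]
      -- previous non-space character exists: case on the punctuation test
        · by_cases hp : (prev = '.' || prev = '!' || prev = '?') = true
          · simp [hget, hk0, hp]
          · simp only [Bool.not_eq_true] at hp
            simp [hget, hk0, hp, hk]
    · have hdrop : cs.drop k = [] := List.drop_eq_nil_of_le (by omega)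
      rw [pvLoopA, dif_neg h, hdrop, pvLoopB]

-- ===== VERDICT (by name: the statement is the Claim_ definition above) =====
theorem fix_maiuscole_func_spec : Claim_equal_fix_maiuscole_func := by
  intro text _
  unfold Spec_fix_maiuscole_func fix_maiuscole_func fix_maiuscole_func_alt
  by_cases he : text.toList = []
  · rw [if_pos he, he, pvLoopB, String.toList_eq_nil_iff.mp he]
  · rw [if_neg he, pvLoop_eq, List.drop_zero, pvScanBack]
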